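-- pv_equiv track=rewrite | github.com/772vjrvj/pythoncrawling | kmong/2026-01-20_thairath/main_태국1.py | guess_ext_from_url
-- ===== SOURCE A (Python) =====
-- def guess_ext_from_url(url):
--     """
--     URL에서 확장자 추정. 애매하면 jpg
--     """
--     if not url:
--         return "jpg"
--     u = url.split("?")[0].split("#")[0].lower()
--     for ext in ("jpg", "jpeg", "png", "webp", "gif"):
--         if u.endswith("." + ext):
--             return "jpg" if ext == "jpeg" else ext
--     return "jpg"
-- ===== SOURCE B (Python) =====
-- _EXT_MAP = {"jpg": "jpg", "jpeg": "jpg", "png": "png", "webp": "webp", "gif": "gif"}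
--
-- def guess_ext_from_url(url):
--     """
--     URL에서 확장자 추정. 애매하면 jpg
--     """
--     if not url:
--         return "jpg"
--     u = url.split("?")[0].split("#")[0].lower()
--     parts = u.rsplit(".", 1)
--     if len(parts) == 2:
--         return _EXT_MAP.get(parts[1], "jpg")
--     return "jpg"
-- ===== Notes on version B (the rewrite author's own statement) =====
-- stated objective: simpler
-- what changed: Replaces the candidate-scan loop of endswith tests by computing the trailing extension once with rsplit('.', 1) and looking it up in a small mapping (jpeg->jpg, others to themselves), defaulting to 'jpg'.
import Mathlib
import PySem

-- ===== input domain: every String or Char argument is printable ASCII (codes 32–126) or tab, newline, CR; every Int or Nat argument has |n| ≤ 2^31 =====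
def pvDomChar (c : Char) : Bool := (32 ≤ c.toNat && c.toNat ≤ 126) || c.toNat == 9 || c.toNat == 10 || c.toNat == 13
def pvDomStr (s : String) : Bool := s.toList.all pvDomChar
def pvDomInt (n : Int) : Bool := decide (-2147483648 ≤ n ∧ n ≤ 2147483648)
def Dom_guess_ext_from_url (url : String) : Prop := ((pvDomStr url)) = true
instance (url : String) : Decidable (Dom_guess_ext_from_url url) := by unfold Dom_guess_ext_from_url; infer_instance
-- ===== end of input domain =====

-- B replaces A's candidate-scan of endswith tests by computing the part after the
-- last '.' once (rsplit) and looking it up in a small map; objective: simpler.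

-- ===== PORT A =====
-- shared url cleanup (both Pythons start with the identical line
--   u = url.split("?")[0].split("#")[0].lower()  );
-- str.split always returns a nonempty list, so [0] = headD [] is exact.
def pvClean (url : String) : List Char :=
  PySem.Chars.lower
    ((PySem.Chars.splitOn
        ((PySem.Chars.splitOn url.toList "?".toList).headD []) "#".toList).headD [])

-- the  for ext in ("jpg", "jpeg", "png", "webp", "gif")  loop with early return
def pvScanExts (u : List Char) : List String → String
  | [] => "jpg"
  | ext :: rest =>
      if PySem.Chars.endswith u ('.' :: ext.toList) then
        (if ext = "jpeg" then "jpg" else ext)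
      else pvScanExts u rest

def guess_ext_from_url (url : String) : String :=
  if url = "" then "jpg"
  else pvScanExts (pvClean url) ["jpg", "jpeg", "png", "webp", "gif"]

-- ===== PORT B =====
def pvExtMap : PySem.Dict (List Char) String :=
  PySem.Dict.ofList
    [("jpg".toList, "jpg"), ("jpeg".toList, "jpg"), ("png".toList, "png"),
     ("webp".toList, "webp"), ("gif".toList, "gif")]

-- hand port of u.rsplit(".", 1), exact: with maxsplit 1 it splits at the LAST '.',
-- giving two parts iff '.' occurs; B only uses the part after the last '.'.
def pvRSplitTail (u : List Char) : Option (List Char) :=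
  if u.contains '.' then some ((u.reverse.takeWhile (· != '.')).reverse) else none

def guess_ext_from_url_alt (url : String) : String :=
  if url = "" then "jpg"
  else
    match pvRSplitTail (pvClean url) with
    | some tail => PySem.Dict.getD pvExtMap tail "jpg"
    | none => "jpg"

-- ===== PRECONDITION & SPEC =====
def Spec_guess_ext_from_url (url : String) (out : String) : Prop := out = guess_ext_from_url_alt url
instance (url : String) (out : String) : Decidable (Spec_guess_ext_from_url url out) := by unfold Spec_guess_ext_from_url; infer_instance

-- ===== CLAIM (what is proved, stated in full; the proofs are below) =====
def Claim_equal_guess_ext_from_url : Prop := ∀ (url : String), Dom_guess_ext_from_url url → Spec_guess_ext_from_url url (guess_ext_from_url url)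

-- ===== LEMMAS AND PROOFS =====

lemma takeWhile_append_dotfree (f rest : List Char) (hf : ('.' : Char) ∉ f) :
    (f ++ '.' :: rest).takeWhile (· != '.') = f := by
  induction f with
  | nil => simp
  | cons a t ih =>
      simp only [List.mem_cons, not_or] at hf
      have ha : (a != '.') = true := by simpa using Ne.symm hf.1
      simp [ha, ih hf.2]

-- u.endswith("." + e) for a dot-free e holds iff u has a dot and the part after
-- the LAST dot is exactly e.
lemma endswith_dot_iff (u e : List Char) (he : ('.' : Char) ∉ e) :
    PySem.Chars.endswith u ('.' :: e) = true ↔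
      ('.' ∈ u ∧ (u.reverse.takeWhile (· != '.')).reverse = e) := by
  rw [PySem.Chars.endswith_iff]
  constructor
  · rintro ⟨pre, rfl⟩
    refine ⟨by simp, ?_⟩
    have : (pre ++ '.' :: e).reverse = e.reverse ++ '.' :: pre.reverse := by simp
    rw [this, takeWhile_append_dotfree _ _ (by simpa using he), List.reverse_reverse]
  · rintro ⟨hdot, hs⟩
    set r := u.reverse with hr
    set f := r.takeWhile (· != '.') with hfdef
    have hfd : f ++ r.dropWhile (· != '.') = r := List.takeWhile_append_dropWhile
    have hdne : r.dropWhile (· != '.') ≠ [] := by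
      intro h0
      rw [h0, List.append_nil] at hfd
      have : ('.' : Char) ∈ f := by
        rw [hfd]; simpa [hr] using hdot
      have := List.mem_takeWhile_imp this
      simp at this
    obtain ⟨c, d, hd⟩ := List.exists_cons_of_ne_nil hdne
    have hc : c = '.' := by
      have h := List.head_dropWhile_not (fun x => x != '.') (l := r) hdne
      have hA : (r.dropWhile (fun x => x != '.')).head? = some c := by rw [hd]; rfl
      have hB : (r.dropWhile (fun x => x != '.')).head? =
          some ((r.dropWhile (fun x => x != '.')).head hdne) := List.head?_eq_some_head hdne
      rw [hB] at hA
      rw [Option.some_inj.1 hA] at h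
      simpa using h
    have hu : u = d.reverse ++ '.' :: e := by
      have hfr : r = f ++ '.' :: d := by rw [← hfd, hd, hc]
      have hur : u = r.reverse := by rw [hr, List.reverse_reverse]
      rw [hur, hfr]
      simp [hs]
    exact ⟨d.reverse, hu.symm⟩

lemma scan_eq_lookup (u : List Char) :
    pvScanExts u ["jpg", "jpeg", "png", "webp", "gif"] =
      (match pvRSplitTail u with
       | some tail => PySem.Dict.getD pvExtMap tail "jpg"
       | none => "jpg") := by
  by_cases hdot : ('.' : Char) ∈ u
  · have hc : u.contains '.' = true := by simpa using hdot
    generalize hg : (u.reverse.takeWhile (· != '.')).reverse = s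
    have hend : ∀ e : List Char, ('.' : Char) ∉ e →
        (PySem.Chars.endswith u ('.' :: e) = true ↔ s = e) := by
      intro e he
      rw [endswith_dot_iff u e he, hg]
      exact ⟨fun h => h.2, fun h => ⟨hdot, h⟩⟩
    simp only [pvRSplitTail, hc, if_true, hg]
    simp only [pvScanExts,
      (by decide : "jpg".toList = ['j', 'p', 'g']),
      (by decide : "jpeg".toList = ['j', 'p', 'e', 'g']),
      (by decide : "png".toList = ['p', 'n', 'g']),
      (by decide : "webp".toList = ['w', 'e', 'b', 'p']),
      (by decide : "gif".toList = ['g', 'i', 'f'])]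
    by_cases h1 : s = ['j', 'p', 'g']
    · have t := (hend _ (by decide)).2 h1
      rw [h1]
      simp only [t, if_true]
      decide
    · have e1 : PySem.Chars.endswith u ('.' :: ['j', 'p', 'g']) = false := by
        rw [Bool.eq_false_iff]; intro h; exact h1 ((hend _ (by decide)).1 h)
      by_cases h2 : s = ['j', 'p', 'e', 'g']
      · have t := (hend _ (by decide)).2 h2
        rw [h2]
        simp only [e1, t, if_true, Bool.false_eq_true, if_false]
        decide
      · have e2 : PySem.Chars.endswith u ('.' :: ['j', 'p', 'e', 'g']) = false := by
          rw [Bool.eq_false_iff]; intro h; exact h2 ((hend _ (by decide)).1 h)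
        by_cases h3 : s = ['p', 'n', 'g']
        · have t := (hend _ (by decide)).2 h3
          rw [h3]
          simp only [e1, e2, t, if_true, Bool.false_eq_true, if_false]
          decide
        · have e3 : PySem.Chars.endswith u ('.' :: ['p', 'n', 'g']) = false := by
            rw [Bool.eq_false_iff]; intro h; exact h3 ((hend _ (by decide)).1 h)
          by_cases h4 : s = ['w', 'e', 'b', 'p']
          · have t := (hend _ (by decide)).2 h4
            rw [h4]
            simp only [e1, e2, e3, t, if_true, Bool.false_eq_true, if_false]
            decide
          · have e4 : PySem.Chars.endswith u ('.' :: ['w', 'e', 'b', 'p']) = false := by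
              rw [Bool.eq_false_iff]; intro h; exact h4 ((hend _ (by decide)).1 h)
            by_cases h5 : s = ['g', 'i', 'f']
            · have t := (hend _ (by decide)).2 h5
              rw [h5]
              simp only [e1, e2, e3, e4, t, if_true, Bool.false_eq_true,
                if_false]
              decide
            · have e5 : PySem.Chars.endswith u ('.' :: ['g', 'i', 'f']) = false := by
                rw [Bool.eq_false_iff]; intro h; exact h5 ((hend _ (by decide)).1 h)
              have b1 : (['j', 'p', 'g'] == s) = false := by simpa using Ne.symm h1
              have b2 : (['j', 'p', 'e', 'g'] == s) = false := by simpa using Ne.symm h2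
              have b3 : (['p', 'n', 'g'] == s) = false := by simpa using Ne.symm h3
              have b4 : (['w', 'e', 'b', 'p'] == s) = false := by simpa using Ne.symm h4
              have b5 : (['g', 'i', 'f'] == s) = false := by simpa using Ne.symm h5
              simp [e1, e2, e3, e4, e5, pvExtMap, PySem.Dict.getD,
                PySem.Dict.ofList, PySem.Dict.get?, PySem.Dict.update,
                PySem.Dict.insert, PySem.Dict.empty, List.find?, b1, b2, b3, b4, b5]
  · have hc : u.contains '.' = false := by simpa using hdot
    have hend : ∀ e : List Char, PySem.Chars.endswith u ('.' :: e) = false := by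
      intro e
      rw [Bool.eq_false_iff]
      intro h
      rcases (PySem.Chars.endswith_iff u ('.' :: e)).1 h with ⟨pre, rfl⟩
      exact hdot (by simp)
    simp [pvScanExts, hend, pvRSplitTail, hdot]

-- ===== VERDICT (by name: the statement is the Claim_ definition above) =====
theorem guess_ext_from_url_spec : Claim_equal_guess_ext_from_url := by
  intro url _
  unfold Spec_guess_ext_from_url guess_ext_from_url guess_ext_from_url_alt
  by_cases h : url = ""
  · simp [h]
  · simp only [h]
    exact scan_eq_lookup (pvClean url)
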